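-- pv_equiv track=rewrite | github.com/lionelkusch/patien-analysis | pipeline_phate_clustering/functions_helper/load_data.py | consecutiveRanges
-- ===== SOURCE A (Python) =====
-- def consecutiveRanges(a):
--     """
--     compute range of time of consecutive value different of zeros
--     :param a: data
--     :return: list of range data
--     """
--     n = len(a)
--     length = 1
--     list = []
--     if (n == 0):
--         return list
--     for i in range(1, n + 1):
--         if (i == n or a[i] - a[i - 1] != 1):
--             if (a[i - length] != 0):
--                 temp = (a[i - length] - 1, a[i - 1])
--                 list.append(temp)
--             length = 1
--         else:
--             length += 1
--     return list
-- ===== SOURCE B (Python) =====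
-- def consecutiveRanges(a):
--     # Stateless staged comprehensions: mark the run boundaries via pairwise
--     # differences, select run-start and run-end values independently, zip them.
--     breaks = [x - y != 1 for x, y in zip(a[1:], a)]
--     starts = [x for x, b in zip(a, [True] + breaks) if b]
--     ends = [x for x, b in zip(a, breaks + [True]) if b]
--     return [(s - 1, e) for s, e in zip(starts, ends) if s != 0]
-- ===== Notes on version B (the rewrite author's own statement) =====
-- stated objective: simpler
-- what changed: Replaces A's stateful index loop with run-length bookkeeping by stateless staged comprehensions: compute pairwise break marks with zip(a[1:], a), select run-start and run-end values by filtering a against shifted mark lists, and zip starts with ends.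
import Mathlib
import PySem

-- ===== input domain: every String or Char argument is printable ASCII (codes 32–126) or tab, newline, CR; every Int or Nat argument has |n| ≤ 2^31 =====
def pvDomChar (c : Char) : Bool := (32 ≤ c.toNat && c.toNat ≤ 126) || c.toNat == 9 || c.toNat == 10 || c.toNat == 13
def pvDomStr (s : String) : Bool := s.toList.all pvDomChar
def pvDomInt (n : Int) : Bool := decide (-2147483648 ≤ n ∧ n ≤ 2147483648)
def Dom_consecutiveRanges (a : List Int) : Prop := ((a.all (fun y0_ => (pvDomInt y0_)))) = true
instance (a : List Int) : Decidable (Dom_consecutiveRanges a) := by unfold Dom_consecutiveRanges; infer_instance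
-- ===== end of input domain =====

-- B replaces A's stateful run-length loop by stateless staged comprehensions:
-- pairwise-difference break marks, independent selection of run-start and
-- run-end values, then a zip; same O(n) cost, objective: simpler.

-- ===== PORT A =====
-- Loop body of A's 'for i in range(1, n + 1)'; state = (length, list).
-- pyGetD _ _ 0 is exact here: every index A reads is in range (1 ≤ length ≤ i ≤ n).
def aStep (a : List Int) (st : Int × List (Int × Int)) (i : Int) : Int × List (Int × Int) :=
  if i = (a.length : Int) ∨ PySem.List.pyGetD a i 0 - PySem.List.pyGetD a (i - 1) 0 ≠ 1 then
    if PySem.List.pyGetD a (i - st.1) 0 ≠ 0 then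
      (1, st.2 ++ [(PySem.List.pyGetD a (i - st.1) 0 - 1, PySem.List.pyGetD a (i - 1) 0)])
    else (1, st.2)
  else (st.1 + 1, st.2)

def consecutiveRanges (a : List Int) : List (Int × Int) :=
  if a.length = 0 then []
  else ((PySem.List.pyRange 1 ((a.length : Int) + 1) 1).foldl (aStep a) (1, [])).2

-- ===== PORT B =====
-- Source B line by line: breaks = [x - y != 1 for x, y in zip(a[1:], a)];
-- starts/ends filter a against [True]+breaks / breaks+[True]; final zip comprehension.
def consecutiveRanges_alt (a : List Int) : List (Int × Int) :=
  let breaks := (List.zip (PySem.List.slice a (some 1) none) a).map (fun p => decide (p.1 - p.2 ≠ 1))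
  let starts := ((List.zip a (true :: breaks)).filter (fun p => p.2)).map (fun p => p.1)
  let ends := ((List.zip a (breaks ++ [true])).filter (fun p => p.2)).map (fun p => p.1)
  ((List.zip starts ends).filter (fun p => decide (p.1 ≠ 0))).map (fun p => (p.1 - 1, p.2))

-- ===== PRECONDITION & SPEC =====
def Spec_consecutiveRanges (a : List Int) (out : List (Int × Int)) : Prop := out = consecutiveRanges_alt a
instance (a : List Int) (out : List (Int × Int)) : Decidable (Spec_consecutiveRanges a out) := by unfold Spec_consecutiveRanges; infer_instance

-- ===== CLAIM (what is proved, stated in full; the proofs are below) =====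
def Claim_equal_consecutiveRanges : Prop := ∀ (a : List Int), Dom_consecutiveRanges a → Spec_consecutiveRanges a (consecutiveRanges a)

-- ===== LEMMAS AND PROOFS =====

-- Canonical recursion both ports are reduced to: go start last rest processes the
-- remaining elements, 'start'/'last' being the first/last value of the current run.
def go (start last : Int) : List Int → List (Int × Int)
  | [] => if start ≠ 0 then [(start - 1, last)] else []
  | y :: ys =>
    if y - last = 1 then go start y ys
    else (if start ≠ 0 then [(start - 1, last)] else []) ++ go y y ys

-- the break marks of x::xs (B's 'breaks')
def brk (x : Int) (xs : List Int) : List Bool :=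
  (List.zip xs (x :: xs)).map (fun p => decide (p.1 - p.2 ≠ 1))

-- tail of the run-start values of x::xs, and the run-end values of x::xs
def Stail (x : Int) : List Int → List Int
  | [] => []
  | y :: ys => if y - x ≠ 1 then y :: Stail y ys else Stail y ys

def Ev (x : Int) : List Int → List Int
  | [] => [x]
  | y :: ys => if y - x ≠ 1 then x :: Ev y ys else Ev y ys

def render2 (l : List (Int × Int)) : List (Int × Int) :=
  (l.filter (fun p => decide (p.1 ≠ 0))).map (fun p => (p.1 - 1, p.2))

lemma brk_cons (x y : Int) (ys : List Int) :
    brk x (y :: ys) = decide (y - x ≠ 1) :: brk y ys := by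
  simp [brk, List.zip]

lemma stail_eq : ∀ (xs : List Int) (x : Int),
    ((List.zip xs (brk x xs)).filter (fun p => p.2)).map (fun p => p.1) = Stail x xs := by
  intro xs
  induction xs with
  | nil => intro x; simp [brk, Stail]
  | cons y ys ih =>
    intro x
    rw [brk_cons]
    by_cases h : y - x ≠ 1 <;> simp [List.zip_cons_cons, Stail, h, ih y]

lemma ends_eq : ∀ (xs : List Int) (x : Int),
    ((List.zip (x :: xs) (brk x xs ++ [true])).filter (fun p => p.2)).map (fun p => p.1)
      = Ev x xs := by
  intro xs
  induction xs with
  | nil => intro x; simp [brk, Ev]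
  | cons y ys ih =>
    intro x
    rw [brk_cons]
    by_cases h : y - x ≠ 1 <;> simp [List.zip_cons_cons, Ev, h, ih y]

lemma render2_go : ∀ (xs : List Int) (s x : Int),
    render2 (List.zip (s :: Stail x xs) (Ev x xs)) = go s x xs := by
  intro xs
  induction xs with
  | nil =>
    intro s x
    by_cases h : s = 0 <;> simp [Stail, Ev, render2, go, List.zip, h]
  | cons y ys ih =>
    intro s x
    by_cases h : y - x = 1
    · have h' : ¬ (y - x ≠ 1) := by simpa using h
      simp only [Stail, Ev, if_neg h', go, if_pos h]
      exact ih s y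
    · simp only [Stail, Ev, if_pos h, go, if_neg h]
      have : List.zip (s :: y :: Stail y ys) (x :: Ev y ys)
          = (s, x) :: List.zip (y :: Stail y ys) (Ev y ys) := by simp [List.zip_cons_cons]
      rw [this]
      by_cases hs : s = 0
      · simp only [render2, List.filter_cons, hs]
        simpa [render2] using ih y y
      · have hgo := ih y y
        simp only [render2, ne_eq, decide_not] at hgo ⊢
        simp [hs, hgo]

lemma B_result (x : Int) (xs : List Int) :
    consecutiveRanges_alt (x :: xs) = go x x xs := by
  unfold consecutiveRanges_alt
  rw [PySem.List.slice_from_one]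
  show render2 (List.zip
      (((List.zip (x :: xs) (true :: brk x xs)).filter (fun p => p.2)).map (fun p => p.1))
      (((List.zip (x :: xs) (brk x xs ++ [true])).filter (fun p => p.2)).map (fun p => p.1)))
    = go x x xs
  have hst : ((List.zip (x :: xs) (true :: brk x xs)).filter (fun p => p.2)).map (fun p => p.1)
      = x :: Stail x xs := by
    simp [List.zip_cons_cons, stail_eq xs x]
  rw [hst, ends_eq xs x]
  exact render2_go xs x x

-- A-side invariant: after reaching loop index i with run start index s
-- (so length = i - s), the rest of the loop appends go (a[s]) (a[i-1]) (a.drop i).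
lemma A_inv (a : List Int) : ∀ (k s i : Nat) (acc : List (Int × Int)),
    i + k = a.length → s < i →
    ((PySem.List.pyRange (i : Int) ((a.length : Int) + 1) 1).foldl (aStep a)
        (((i - s : Nat) : Int), acc)).2
      = acc ++ go (a.getD s 0) (a.getD (i - 1) 0) (a.drop i) := by
  intro k
  induction k with
  | zero =>
    intro s i acc hik hsi
    have hin : i = a.length := by omega
    subst hin
    rw [PySem.List.pyRange_one_singleton]
    have hs : (((a.length : Nat) : Int) - ((a.length - s : Nat) : Int)) = ((s : Nat) : Int) := by
      omega
    have hgs : PySem.List.pyGetD a ((s : Nat) : Int) 0 = a.getD s 0 :=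
      PySem.List.pyGetD_natCast ..
    have hg1 : PySem.List.pyGetD a (((a.length : Nat) : Int) - 1) 0 = a.getD (a.length - 1) 0 := by
      have : (((a.length : Nat) : Int) - 1) = ((a.length - 1 : Nat) : Int) := by omega
      rw [this]; exact PySem.List.pyGetD_natCast ..
    simp only [List.foldl_cons, List.foldl_nil, aStep, hs, hgs, hg1, true_or, if_true,
      List.drop_length, go, List.getD]
    by_cases h : a[s]?.getD 0 = 0 <;> simp [h]
  | succ k ih =>
    intro s i acc hik hsi
    have hi : (i : Int) < (a.length : Int) + 1 := by omega
    rw [PySem.List.pyRange_one_cons hi, List.foldl_cons]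
    have hne : (i : Int) ≠ (a.length : Int) := by omega
    have hs : ((i : Int) - ((i - s : Nat) : Int)) = ((s : Nat) : Int) := by omega
    have hgs : PySem.List.pyGetD a ((s : Nat) : Int) 0 = a.getD s 0 :=
      PySem.List.pyGetD_natCast ..
    have hg1 : PySem.List.pyGetD a ((i : Int) - 1) 0 = a.getD (i - 1) 0 := by
      have : ((i : Int) - 1) = ((i - 1 : Nat) : Int) := by omega
      rw [this]; exact PySem.List.pyGetD_natCast ..
    have hgi : PySem.List.pyGetD a (i : Int) 0 = a.getD i 0 :=
      PySem.List.pyGetD_natCast ..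
    have hilt : i < a.length := by omega
    have hdrop : a.drop i = a.getD i 0 :: a.drop (i + 1) := by
      rw [List.drop_eq_getElem_cons hilt, List.getD_eq_getElem a 0 hilt]
    have hsucc : ((i : Nat) : Int) + 1 = (((i + 1 : Nat)) : Int) := by push_cast; ring
    by_cases h : a.getD i 0 - a.getD (i - 1) 0 = 1
    · have hcond : ¬ ((i : Int) = (a.length : Int) ∨ a.getD i 0 - a.getD (i - 1) 0 ≠ 1) := by
        simp only [not_or, not_not]
        exact ⟨hne, h⟩
      have hstep : aStep a (((i - s : Nat) : Int), acc) (i : Int)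
          = ((((i + 1) - s : Nat) : Int), acc) := by
        simp only [aStep, hgi, hg1]
        rw [if_neg hcond]
        have : ((i - s : Nat) : Int) + 1 = (((i + 1) - s : Nat) : Int) := by omega
        rw [this]
      rw [hstep, hsucc, ih s (i + 1) acc (by omega) (by omega)]
      rw [hdrop]
      simp only [go, if_pos h, Nat.add_sub_cancel]
    · have hcond : ((i : Int) = (a.length : Int) ∨ a.getD i 0 - a.getD (i - 1) 0 ≠ 1) :=
        Or.inr h
      by_cases h0 : a.getD s 0 ≠ 0
      · have hstep : aStep a (((i - s : Nat) : Int), acc) (i : Int)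
            = ((((i + 1) - (i : Nat) : Nat) : Int),
               acc ++ [(a.getD s 0 - 1, a.getD (i - 1) 0)]) := by
          simp only [aStep, hgi, hg1, hs, hgs]
          rw [if_pos hcond, if_pos h0]
          have h1 : ((1 : Int)) = (((i + 1) - (i : Nat) : Nat) : Int) := by omega
          exact congrArg (fun t => (t, acc ++ [(a.getD s 0 - 1, a.getD (i - 1) 0)])) h1
        rw [hstep, hsucc, ih i (i + 1) _ (by omega) (by omega)]
        rw [hdrop]
        simp only [go, if_neg h, if_pos h0, Nat.add_sub_cancel, List.append_assoc,
          List.singleton_append]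
      · have hstep : aStep a (((i - s : Nat) : Int), acc) (i : Int)
            = ((((i + 1) - (i : Nat) : Nat) : Int), acc) := by
          simp only [aStep, hgi, hg1, hs, hgs]
          rw [if_pos hcond, if_neg h0]
          have h1 : ((1 : Int)) = (((i + 1) - (i : Nat) : Nat) : Int) := by omega
          exact congrArg (fun t => (t, acc)) h1
        rw [hstep, hsucc, ih i (i + 1) _ (by omega) (by omega)]
        rw [hdrop]
        simp only [go, if_neg h, if_neg h0, Nat.add_sub_cancel, List.nil_append]

lemma A_result (x : Int) (xs : List Int) :
    consecutiveRanges (x :: xs) = go x x xs := by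
  have h := A_inv (x :: xs) xs.length 0 1 [] (by simp only [List.length_cons]; omega) (by omega)
  rw [consecutiveRanges]
  simp only [List.length_cons, if_neg (Nat.succ_ne_zero xs.length)]
  simpa using h

-- ===== VERDICT (by name: the statement is the Claim_ definition above) =====
theorem consecutiveRanges_spec : Claim_equal_consecutiveRanges := by
  intro a _
  unfold Spec_consecutiveRanges
  cases a with
  | nil => rfl
  | cons x xs => rw [A_result, B_result]
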